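-- pv_equiv track=rewrite | github.com/reza-asad/3DSSR | models/Random/random_run.py | map_cat_to_objects
-- ===== SOURCE A (Python) =====
-- def map_cat_to_objects(scene, source_node):
--     cat_to_objects = {}
--     # map each category to its object id except for the source node
--     for obj, node_info in scene.items():
--         if obj != source_node:
--             cat = node_info['category'][0]
--             if cat not in cat_to_objects:
--                 cat_to_objects[cat] = [obj]
--             else:
--                 cat_to_objects[cat].append(obj)
--     return cat_to_objects
-- ===== SOURCE B (Python) =====
-- def map_cat_to_objects(scene, source_node):
--     # one flat pass extracting (category, obj) pairs, then a dict-comprehension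
--     # grouping driven by the ordered distinct categories
--     pairs = [(info['category'][0], obj) for obj, info in scene.items() if obj != source_node]
--     cats = dict.fromkeys(cat for cat, _ in pairs)
--     return {cat: [obj for c, obj in pairs if c == cat] for cat in cats}
-- ===== Notes on version B (the rewrite author's own statement) =====
-- stated objective: alternative
-- what changed: Replaces the single hash-bucket accumulation loop with a flat extraction of (category, obj) pairs followed by an ordered-distinct-categories pass that rebuilds each group by filtering, removing the mutable dict state.
import Mathlib
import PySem

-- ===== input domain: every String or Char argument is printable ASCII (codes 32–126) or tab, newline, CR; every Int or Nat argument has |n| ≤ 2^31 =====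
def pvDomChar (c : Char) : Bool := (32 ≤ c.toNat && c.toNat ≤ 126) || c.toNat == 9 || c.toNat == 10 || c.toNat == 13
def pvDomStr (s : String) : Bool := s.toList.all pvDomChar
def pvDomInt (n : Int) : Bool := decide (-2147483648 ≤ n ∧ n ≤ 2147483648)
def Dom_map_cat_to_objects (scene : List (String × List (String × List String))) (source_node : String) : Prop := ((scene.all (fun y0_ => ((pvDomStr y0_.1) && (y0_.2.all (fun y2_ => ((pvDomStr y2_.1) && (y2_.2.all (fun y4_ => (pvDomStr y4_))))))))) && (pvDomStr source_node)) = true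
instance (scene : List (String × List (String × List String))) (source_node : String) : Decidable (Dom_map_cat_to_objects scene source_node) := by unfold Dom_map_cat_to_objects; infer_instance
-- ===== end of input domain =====

-- B groups by first collecting (category, obj) pairs, then mapping each ordered distinct
-- category to its filtered objects — a stateless two-pass decomposition instead of A's
-- mutable dict accumulation (alternative structure, same results).


-- ===== PORT A =====
-- node_info['category'][0]; total form of the lookup — Pre_ guarantees the key exists
-- with a nonempty list, so the defaults are never the result on admitted inputs
def pvCat (info : List (String × List String)) : String :=
  PySem.List.pyGetD ((PySem.Dict.mk info).getD "category" []) 0 ""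

def map_cat_to_objects (scene : List (String × List (String × List String))) (source_node : String) : List (String × List String) :=
  let cat_to_objects : PySem.Dict String (List String) :=
    scene.foldl (fun d p =>
      if p.1 != source_node then
        let cat := pvCat p.2
        if !d.contains cat then d.insert cat [p.1]
        else d.modify cat [] (fun l => l ++ [p.1])
      else d) PySem.Dict.empty
  cat_to_objects.items

-- ===== PORT B =====
def map_cat_to_objects_alt (scene : List (String × List (String × List String))) (source_node : String) : List (String × List String) :=
  let pairs := (scene.filter (fun p => p.1 != source_node)).map (fun p => (pvCat p.2, p.1))
  let cats := PySem.List.dedup (pairs.map (fun q => q.1))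
  cats.map (fun c => (c, (pairs.filter (fun q => q.1 == c)).map (fun q => q.2)))

-- ===== PRECONDITION & SPEC =====
-- Pre_ excludes exactly the inputs on which Python A raises: a non-source node whose
-- dict has no 'category' key (KeyError) or an empty 'category' list (IndexError)
def Pre_map_cat_to_objects (scene : List (String × List (String × List String))) (source_node : String) : Prop :=
  ∀ p ∈ scene, p.1 = source_node ∨ (PySem.Dict.mk p.2).getD "category" [] ≠ []
instance (scene : List (String × List (String × List String))) (source_node : String) : Decidable (Pre_map_cat_to_objects scene source_node) := by unfold Pre_map_cat_to_objects; infer_instance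

def pvWitness_map_cat_to_objects : (List (String × List (String × List String))) × String :=
  ([("a", [("category", ["chair"])]), ("b", [("category", ["desk", "x"])]), ("s", [])], "s")

def Spec_map_cat_to_objects (scene : List (String × List (String × List String))) (source_node : String) (out : List (String × List String)) : Prop := out = map_cat_to_objects_alt scene source_node
instance (scene : List (String × List (String × List String))) (source_node : String) (out : List (String × List String)) : Decidable (Spec_map_cat_to_objects scene source_node out) := by unfold Spec_map_cat_to_objects; infer_instance

-- ===== CLAIM (what is proved, stated in full; the proofs are below) =====
def Claim_equal_map_cat_to_objects : Prop := ∀ (scene : List (String × List (String × List String))) (source_node : String), Dom_map_cat_to_objects scene source_node → Pre_map_cat_to_objects scene source_node → Spec_map_cat_to_objects scene source_node (map_cat_to_objects scene source_node)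

-- ===== LEMMAS AND PROOFS =====

-- A's two-way branch is exactly Dict.modify (on a fresh key, modify inserts f [])
theorem pv_step_eq (d : PySem.Dict String (List String)) (cat obj : String) :
    (if !d.contains cat then d.insert cat [obj] else d.modify cat [] (fun l => l ++ [obj]))
      = d.modify cat [] (fun l => l ++ [obj]) := by
  by_cases h : d.contains cat
  · simp [h]
  · simp only [Bool.not_eq_true] at h
    simp [h, PySem.Dict.modify, PySem.Dict.getD_of_not_contains _ _ h]

-- A's fold over the scene is the canonical modify-append fold over B's pair list
theorem pv_fold_eq (scene : List (String × List (String × List String))) (source_node : String)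
    (d : PySem.Dict String (List String)) :
    scene.foldl (fun d p =>
      if p.1 != source_node then
        (if !d.contains (pvCat p.2) then d.insert (pvCat p.2) [p.1]
         else d.modify (pvCat p.2) [] (fun l => l ++ [p.1]))
      else d) d
    = ((scene.filter (fun p => p.1 != source_node)).map (fun p => (pvCat p.2, p.1))).foldl
        (fun d q => d.modify q.1 [] (fun l => l ++ [q.2])) d := by
  rw [List.foldl_map, List.foldl_filter]
  induction scene generalizing d with
  | nil => rfl
  | cons p rest ih =>
      simp only [List.foldl_cons]
      by_cases h : p.1 != source_node
      · simp only [h, if_true, pv_step_eq]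
      · simp only [h]; exact ih _

-- the grouped dict, described entry by entry
theorem pv_items_eq (pairs : List (String × String)) :
    (pairs.foldl (fun d q => d.modify q.1 [] (fun l => l ++ [q.2])) (PySem.Dict.empty : PySem.Dict String (List String))).items
      = (PySem.List.dedup (pairs.map (fun q => q.1))).map
          (fun c => (c, (pairs.filter (fun q => q.1 == c)).map (fun q => q.2))) := by
  have hkeys :
      (pairs.foldl (fun d q => d.modify q.1 [] (fun l => l ++ [q.2])) (PySem.Dict.empty : PySem.Dict String (List String))).keys
        = PySem.List.dedup (pairs.map (fun q => q.1)) := by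
    have := PySem.Dict.keys_foldl_modify_key pairs (fun q => q.1) ([] : List String)
      (fun _ q l => l ++ [q.2]) PySem.Dict.empty
    simpa [PySem.Set.update, PySem.Set.ofList_eq_foldl] using this
  have hnd :
      (pairs.foldl (fun d q => d.modify q.1 [] (fun l => l ++ [q.2])) (PySem.Dict.empty : PySem.Dict String (List String))).keys.Nodup := by
    exact PySem.Dict.nodup_keys_foldl_modify_key pairs (fun q => q.1) ([] : List String)
      (fun _ q l => l ++ [q.2]) PySem.Dict.empty (by simp)
  rw [PySem.Dict.items_eq_map_keys _ hnd ([] : List String), hkeys]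
  apply List.map_congr_left
  intro c _
  simp [PySem.Dict.getD_foldl_modify_append]

theorem pv_main (scene : List (String × List (String × List String))) (source_node : String) :
    map_cat_to_objects scene source_node = map_cat_to_objects_alt scene source_node := by
  unfold map_cat_to_objects map_cat_to_objects_alt
  rw [pv_fold_eq, pv_items_eq]

-- ===== VERDICT (by name: the statement is the Claim_ definition above) =====
theorem map_cat_to_objects_spec : Claim_equal_map_cat_to_objects := by
  intro scene source_node _ _
  unfold Spec_map_cat_to_objects
  exact pv_main scene source_node
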